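-- pv_equiv track=rewrite | github.com/cjdm94/p300-speller | training_classifier.py | determine_stims
-- ===== SOURCE A (Python) =====
-- def determine_stims(sample_limit,
--                     stim_samples,
--                     subtrial_intvl_samples,
--                     trial_intvl_samples
--                     ):
--     stims = []
--     sampleIndex = 0
--     stimEvents = 0
--     trials = 0
--     while sampleIndex <= sample_limit:
--         stimEvents += 1
--         stims.append(sampleIndex)
--         sampleIndexIncrement = stim_samples
--         if stimEvents % 12 == 0:
--             sampleIndexIncrement = subtrial_intvl_samples
--             trials += 1
--             if trials == 3:
--                 sampleIndexIncrement = trial_intvl_samples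
--                 trials = 0
--         sampleIndex += sampleIndexIncrement
--
--     return stims
-- ===== SOURCE B (Python) =====
-- def determine_stims(sample_limit,
--                     stim_samples,
--                     subtrial_intvl_samples,
--                     trial_intvl_samples
--                     ):
--     # One stimulation period = 36 events.  Precompute the 36 within-period
--     # offsets (prefix sums of the increment cycle) and the total advance per
--     # period; each stimulus position is then base + offset with base = k*period,
--     # emitted period by period until an index exceeds the limit.
--     pattern = ([stim_samples] * 11 + [subtrial_intvl_samples]) * 2 \
--               + [stim_samples] * 11 + [trial_intvl_samples]
--     offsets = []
--     acc = 0
--     for inc in pattern: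
--         offsets.append(acc)
--         acc += inc
--     period = acc
--     stims = []
--     k = 0
--     while True:
--         base = k * period
--         for off in offsets:
--             x = base + off
--             if x > sample_limit:
--                 return stims
--             stims.append(x)
--         k += 1
-- ===== Notes on version B (the rewrite author's own statement) =====
-- stated objective: alternative
-- what changed: B discards A's running sample index and stimEvents/trials counters: it precomputes the 36 within-period offsets (prefix sums of the increment cycle) plus the total advance per period once, then emits positions as k*period + offset in a period-by-period double loop with an early return.
import Mathlib
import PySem

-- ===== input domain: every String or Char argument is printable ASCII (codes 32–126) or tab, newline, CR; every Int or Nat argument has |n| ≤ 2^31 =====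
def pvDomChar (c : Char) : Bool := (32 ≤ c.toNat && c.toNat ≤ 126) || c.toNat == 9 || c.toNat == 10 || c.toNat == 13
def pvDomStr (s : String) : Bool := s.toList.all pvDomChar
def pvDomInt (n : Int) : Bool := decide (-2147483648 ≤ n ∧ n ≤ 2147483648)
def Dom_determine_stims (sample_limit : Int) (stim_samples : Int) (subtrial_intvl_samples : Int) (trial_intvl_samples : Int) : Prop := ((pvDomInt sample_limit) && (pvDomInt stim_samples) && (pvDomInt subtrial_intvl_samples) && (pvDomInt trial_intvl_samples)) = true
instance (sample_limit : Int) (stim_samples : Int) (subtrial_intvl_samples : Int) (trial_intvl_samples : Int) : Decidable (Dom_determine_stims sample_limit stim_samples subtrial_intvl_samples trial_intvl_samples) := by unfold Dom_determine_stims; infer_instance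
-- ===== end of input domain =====

-- B replaces A's running index and stimEvents/trials counters by precomputed per-period
-- offsets (prefix sums) and positions k*period + offset, period by period (objective: alternative).

-- ===== PORT A =====
-- fuel-bounded transliteration of A's while loop; state = (sampleIndex, stimEvents, trials);
-- the fuel is a port artifact making the loop total, large enough for every terminating run.
def detLoopA (limit stim sub trial : Int) : Nat → Int → Int → Int → List Int
  | 0, _, _, _ => []
  | fuel+1, sampleIndex, stimEvents, trials =>
    if sampleIndex ≤ limit then
      let stimEvents' := stimEvents + 1
      let p : Int × Int :=
        if stimEvents' % 12 = 0 then
          let trials' := trials + 1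
          if trials' = 3 then (trial, 0) else (sub, trials')
        else (stim, trials)
      sampleIndex :: detLoopA limit stim sub trial fuel (sampleIndex + p.1) stimEvents' p.2
    else []

-- fuel bound: if the loop terminates at all, it does so within this many iterations
def detFuel (sample_limit stim_samples subtrial_intvl_samples trial_intvl_samples : Int) : Nat :=
  36 * (sample_limit.toNat + 33 * stim_samples.natAbs + 2 * subtrial_intvl_samples.natAbs
        + trial_intvl_samples.natAbs + 2) + 80

def determine_stims (sample_limit : Int) (stim_samples : Int) (subtrial_intvl_samples : Int) (trial_intvl_samples : Int) : List Int :=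
  detLoopA sample_limit stim_samples subtrial_intvl_samples trial_intvl_samples
    (detFuel sample_limit stim_samples subtrial_intvl_samples trial_intvl_samples) 0 0 0

-- ===== PORT B =====
-- Source B's pattern: ([stim]*11 + [sub]) * 2 + [stim]*11 + [trial]
def patternB (stim sub trial : Int) : List Int :=
  let block := List.replicate 11 stim ++ [sub]
  block ++ block ++ (List.replicate 11 stim ++ [trial])

-- Source B's prefix-sum loop: returns (offsets, acc) after folding the pattern
def offsAcc : List Int → Int → (List Int × Int)
  | [], acc => ([], acc)
  | inc :: rest, acc =>
    let r := offsAcc rest (acc + inc)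
    (acc :: r.1, r.2)

-- Source B's inner for-loop over the offsets of one period; the Nat is fuel (a port artifact):
-- result (emitted, none) = early `return` or fuel exhausted; (emitted, some f') = period done, fuel f' left
def innerB (limit base : Int) : Nat → List Int → (List Int × Option Nat)
  | f, [] => ([], some f)
  | 0, _ :: _ => ([], none)
  | f+1, o :: rest =>
    let x := base + o
    if x > limit then ([], none)
    else
      let r := innerB limit base f rest
      (x :: r.1, r.2)

-- Source B's outer `while True` loop over periods k = 0, 1, …; fuel-bounded (port artifact)
def outerB (limit P : Int) (offs : List Int) (fuel : Nat) (k : Int) : List Int :=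
  match innerB limit (k * P) fuel offs with
  | (l, none) => l
  | (l, some f') =>
    if _hlt : f' < fuel then l ++ outerB limit P offs f' (k + 1) else l
termination_by fuel

def determine_stims_alt (sample_limit : Int) (stim_samples : Int) (subtrial_intvl_samples : Int) (trial_intvl_samples : Int) : List Int :=
  let r := offsAcc (patternB stim_samples subtrial_intvl_samples trial_intvl_samples) 0
  outerB sample_limit r.2 r.1
    (detFuel sample_limit stim_samples subtrial_intvl_samples trial_intvl_samples) 0

-- ===== PRECONDITION & SPEC =====
-- No Pre_: wherever Python A terminates it returns normally; the common fuel bound exceeds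
-- the length of every terminating run and the two fuel-bounded loops agree step for step.
def Spec_determine_stims (sample_limit : Int) (stim_samples : Int) (subtrial_intvl_samples : Int) (trial_intvl_samples : Int) (out : List Int) : Prop := out = determine_stims_alt sample_limit stim_samples subtrial_intvl_samples trial_intvl_samples
instance (sample_limit : Int) (stim_samples : Int) (subtrial_intvl_samples : Int) (trial_intvl_samples : Int) (out : List Int) : Decidable (Spec_determine_stims sample_limit stim_samples subtrial_intvl_samples trial_intvl_samples out) := by unfold Spec_determine_stims; infer_instance

-- ===== CLAIM (what is proved, stated in full; the proofs are below) =====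
def Claim_equal_determine_stims : Prop := ∀ (sample_limit : Int) (stim_samples : Int) (subtrial_intvl_samples : Int) (trial_intvl_samples : Int), Dom_determine_stims sample_limit stim_samples subtrial_intvl_samples trial_intvl_samples → Spec_determine_stims sample_limit stim_samples subtrial_intvl_samples trial_intvl_samples (determine_stims sample_limit stim_samples subtrial_intvl_samples trial_intvl_samples)

-- ===== LEMMAS AND PROOFS =====

-- proof-only intermediate: A's loop with the event counter folded into a closed-form increment
def evLoop (limit s u t : Int) : Nat → Int → Int → List Int
  | 0, _, _ => []
  | f+1, idx, e =>
    if idx ≤ limit then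
      idx :: evLoop limit s u t f
        (idx + (if e % 36 = 35 then t else if (e % 36) % 12 = 11 then u else s)) (e + 1)
    else []

lemma stepA (s u t e : Int) (he : 0 ≤ e) :
    (if (e + 1) % 12 = 0 then
        if (e / 12) % 3 + 1 = 3 then (t, (0 : Int)) else (u, (e / 12) % 3 + 1)
      else (s, (e / 12) % 3))
    = ((if e % 36 = 35 then t else if (e % 36) % 12 = 11 then u else s), ((e + 1) / 12) % 3) := by
  split_ifs <;> refine Prod.ext ?_ ?_ <;> simp <;> omega

lemma A_eq_ev (limit s u t : Int) :
    ∀ (fuel : Nat) (idx e : Int), 0 ≤ e →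
      detLoopA limit s u t fuel idx e ((e / 12) % 3) = evLoop limit s u t fuel idx e := by
  intro fuel
  induction fuel with
  | zero => intro idx e _he; rfl
  | succ n ih =>
    intro idx e he
    show (if idx ≤ limit then _ else _) = (if idx ≤ limit then _ else _)
    by_cases h : idx ≤ limit
    · simp only [if_pos h]
      have hs := stepA s u t e he
      refine congrArg (idx :: ·) ?_
      rw [hs]
      exact ih _ (e + 1) (by omega)
    · simp only [if_neg h]

-- the explicit offsets list of one period and the period total
def offsL (s u : Int) : List Int :=
  [0, s, 2*s, 3*s, 4*s, 5*s, 6*s, 7*s, 8*s, 9*s, 10*s,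
   11*s, 11*s+u, 12*s+u, 13*s+u, 14*s+u, 15*s+u, 16*s+u, 17*s+u, 18*s+u, 19*s+u, 20*s+u, 21*s+u,
   22*s+u, 22*s+2*u, 23*s+2*u, 24*s+2*u, 25*s+2*u, 26*s+2*u, 27*s+2*u, 28*s+2*u, 29*s+2*u,
   30*s+2*u, 31*s+2*u, 32*s+2*u, 33*s+2*u]

lemma offsAcc_eval (s u t : Int) :
    offsAcc (patternB s u t) 0 = (offsL s u, 33*s + 2*u + t) := by
  simp only [patternB, offsAcc, offsL, List.replicate, List.cons_append, List.nil_append,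
    Prod.mk.injEq, List.cons.injEq]
  norm_num
  and_intros <;> ring

lemma offsL_ne_nil (s u : Int) : offsL s u ≠ [] := by simp [offsL]

lemma innerB_fuel_le (limit base : Int) : ∀ (l : List Int) (f : Nat) (out : List Int) (f' : Nat),
    innerB limit base f l = (out, some f') → f' ≤ f := by
  intro l
  induction l with
  | nil => intro f out f' h; simp [innerB] at h; omega
  | cons o rest ih =>
    intro f out f' h
    cases f with
    | zero => simp [innerB] at h
    | succ g =>
      simp only [innerB] at h
      split_ifs at h with hx
      · simp at h
      · have h2 := congrArg Prod.snd h
        simp at h2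
        have := ih g (innerB limit base g rest).1 f' (by rw [← h2])
        omega

lemma innerB_fuel_lt (limit base : Int) (l : List Int) (hl : l ≠ []) (f : Nat)
    (out : List Int) (f' : Nat) (h : innerB limit base f l = (out, some f')) : f' < f := by
  cases l with
  | nil => exact absurd rfl hl
  | cons o rest =>
    cases f with
    | zero => simp [innerB] at h
    | succ g =>
      simp only [innerB] at h
      split_ifs at h with hx
      · simp at h
      · have h2 := congrArg Prod.snd h
        simp at h2
        have := innerB_fuel_le limit base rest g (innerB limit base g rest).1 f' (by rw [← h2])
        omega

-- the r.h.s. shape of the lockstep invariant at within-period position j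
def innerRHS (limit P : Int) (offs : List Int) (f : Nat) (k : Int) (j : Nat) : List Int :=
  match innerB limit (k * P) f (offs.drop j) with
  | (l, none) => l
  | (l, some f') => l ++ outerB limit P offs f' (k + 1)

lemma drop_offsL (s u : Int) (j : Nat) (hj : j < 36) :
    (offsL s u).drop j = (offsL s u)[j]! :: (offsL s u).drop (j+1) := by
  interval_cases j <;> simp [offsL]

lemma offs_step (s u t : Int) (j : Nat) (hj : j < 35) :
    (offsL s u)[j]! + (if ((j:Int)) = 35 then t else if ((j:Int)) % 12 = 11 then u else s)
      = (offsL s u)[j+1]! := by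
  interval_cases j <;> simp [offsL] <;> ring

lemma outerB_eq_innerRHS (limit s u t : Int) (f : Nat) (k : Int) :
    outerB limit (33*s+2*u+t) (offsL s u) f k = innerRHS limit (33*s+2*u+t) (offsL s u) f k 0 := by
  unfold innerRHS
  rw [outerB, List.drop_zero]
  cases hin : innerB limit (k * (33*s+2*u+t)) f (offsL s u) with
  | mk l r =>
    cases r with
    | none => simp
    | some f' =>
      have hlt := innerB_fuel_lt limit (k * (33*s+2*u+t)) (offsL s u) (offsL_ne_nil s u) f l f' hin
      simp [hlt]

theorem lockstep (limit s u t : Int) :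
    ∀ (f : Nat),
      (∀ (k : Int) (j : Nat), j < 36 →
        evLoop limit s u t f (k * (33*s+2*u+t) + (offsL s u)[j]!) (36*k + (j:Int))
          = innerRHS limit (33*s+2*u+t) (offsL s u) f k j)
      ∧ (∀ (k : Int),
        evLoop limit s u t f (k * (33*s+2*u+t)) (36*k)
          = outerB limit (33*s+2*u+t) (offsL s u) f k) := by
  intro f
  induction f using Nat.strong_induction_on with
  | _ f ih =>
    have hS : ∀ (k : Int) (j : Nat), j < 36 →
        evLoop limit s u t f (k * (33*s+2*u+t) + (offsL s u)[j]!) (36*k + (j:Int))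
          = innerRHS limit (33*s+2*u+t) (offsL s u) f k j := by
      intro k j hj
      unfold innerRHS
      rw [drop_offsL s u j hj]
      cases f with
      | zero => simp [evLoop, innerB]
      | succ g =>
        by_cases hle : k * (33*s+2*u+t) + (offsL s u)[j]! ≤ limit
        · have hm : (36*k + (j:Int)) % 36 = (j:Int) := by omega
          simp only [evLoop, innerB, if_pos hle, if_neg (not_lt.mpr hle), hm]
          by_cases hj35 : j < 35
          · -- still inside the period
            have hstep := offs_step s u t j hj35
            have hidx : k * (33*s+2*u+t) + (offsL s u)[j]!
                + (if ((j:Int)) = 35 then t else if ((j:Int)) % 12 = 11 then u else s)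
                = k * (33*s+2*u+t) + (offsL s u)[j+1]! := by rw [add_assoc, hstep]
            have he : 36*k + (j:Int) + 1 = 36*k + ((j+1 : Nat) : Int) := by push_cast; ring
            rw [hidx, he, (ih g (by omega)).1 k (j+1) (by omega)]
            unfold innerRHS
            cases hin : innerB limit (k * (33*s+2*u+t)) g ((offsL s u).drop (j+1)) with
            | mk l r => cases r <;> simp
          · -- j = 35: period boundary
            have hj' : j = 35 := by omega
            subst hj'
            have h35 : (offsL s u)[(35:Nat)]! = 33*s + 2*u := by simp [offsL]
            have hdrop : (offsL s u).drop 36 = [] := by simp [offsL]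
            rw [h35, hdrop]
            have hif : (if ((35:Nat):Int) = 35 then t else if ((35:Nat):Int) % 12 = 11 then u else s) = t := by
              norm_num
            rw [hif,
              show k * (33*s+2*u+t) + (33*s+2*u) + t = (k+1) * (33*s+2*u+t) from by ring,
              show 36*k + ((35:Nat):Int) + 1 = 36*(k+1) from by push_cast; ring,
              (ih g (by omega)).2 (k+1)]
            simp [innerB]
        · have hgt : limit < k * (33*s+2*u+t) + (offsL s u)[j]! := not_le.mp hle
          simp only [evLoop, innerB, if_neg hle, if_pos hgt]
    refine ⟨hS, fun k => ?_⟩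
    have h0 := hS k 0 (by norm_num)
    have hz : (offsL s u)[(0:Nat)]! = 0 := by simp [offsL]
    rw [hz, add_zero] at h0
    norm_num at h0
    rw [h0, outerB_eq_innerRHS]

-- ===== VERDICT (by name: the statement is the Claim_ definition above) =====
theorem determine_stims_spec : Claim_equal_determine_stims := by
  intro L s u t _
  unfold Spec_determine_stims determine_stims determine_stims_alt
  rw [offsAcc_eval]
  have h1 := A_eq_ev L s u t (detFuel L s u t) 0 0 (le_refl 0)
  norm_num at h1
  rw [h1]
  have h2 := (lockstep L s u t (detFuel L s u t)).2 0
  norm_num at h2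
  exact h2
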